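-- pv_equiv track=rewrite | github.com/Fiewor/freeCodeCampJS | leetcode/September/missingRolls.py | missingRolls
-- ===== SOURCE A (Python) =====
-- from typing import List
--
-- def missingRolls(rolls: List[int], mean: int, n: int) -> List[int]:
--     m = len(rolls)
--     max_dice_roll = 6
--     total_sum = (m + n) * mean
--     missing_sum = total_sum - sum(rolls)
--
--     if missing_sum < n or missing_sum > max_dice_roll * n:
--         return []
--
--     res = []
--
--     for x in range(n, 0, -1):
--         val = min(max_dice_roll, missing_sum - x + 1)
--         res.append(val)
--         missing_sum -= val
--
--     return res
--
-- rolls = [1,5,6]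
--
-- mean = 3
--
-- n = 4
-- ===== SOURCE B (Python) =====
-- from typing import List
--
-- def missingRolls(rolls: List[int], mean: int, n: int) -> List[int]:
--     missing_sum = (len(rolls) + n) * mean - sum(rolls)
--     if missing_sum < n or missing_sum > 6 * n:
--         return []
--     extra = missing_sum - n
--     sixes = extra // 5
--     leftover = extra % 5
--     mid = [1 + leftover] if leftover else []
--     return [6] * sixes + mid + [1] * (n - sixes - len(mid))
-- ===== Notes on version B (the rewrite author's own statement) =====
-- stated objective: simpler
-- what changed: Replaced the per-die countdown loop (min(6, missing_sum-x+1) appended n times) by a closed-form construction: as many 6s as fit, one partial die for the remainder mod 5, then 1s, assembled with list repetition.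
import Mathlib
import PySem

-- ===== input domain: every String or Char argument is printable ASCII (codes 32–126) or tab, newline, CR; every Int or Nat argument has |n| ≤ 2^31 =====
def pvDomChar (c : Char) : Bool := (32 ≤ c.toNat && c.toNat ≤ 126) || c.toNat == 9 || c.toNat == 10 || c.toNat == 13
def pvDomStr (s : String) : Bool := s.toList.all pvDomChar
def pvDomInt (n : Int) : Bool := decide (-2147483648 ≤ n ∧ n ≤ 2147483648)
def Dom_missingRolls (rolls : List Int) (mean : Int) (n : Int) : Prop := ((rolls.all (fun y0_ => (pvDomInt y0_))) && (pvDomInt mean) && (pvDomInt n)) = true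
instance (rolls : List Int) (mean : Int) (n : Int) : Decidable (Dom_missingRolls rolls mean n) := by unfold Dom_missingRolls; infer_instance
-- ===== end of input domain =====

-- B replaces A's per-die countdown loop by a closed-form greedy construction (6s, one partial die, 1s); objective: simpler.

-- ===== PORT A =====
def missingRolls (rolls : List Int) (mean : Int) (n : Int) : List Int :=
  let m : Int := rolls.length
  let maxDiceRoll : Int := 6
  let totalSum : Int := (m + n) * mean
  let missingSum : Int := totalSum - rolls.sum
  if missingSum < n ∨ missingSum > maxDiceRoll * n then []
  else
    ((PySem.List.pyRange n 0 (-1)).foldl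
      (fun (st : List Int × Int) x =>
        let val := min maxDiceRoll (st.2 - x + 1)
        (st.1 ++ [val], st.2 - val)) ([], missingSum)).1

-- ===== PORT B =====
def missingRolls_alt (rolls : List Int) (mean : Int) (n : Int) : List Int :=
  let missingSum : Int := ((rolls.length : Int) + n) * mean - rolls.sum
  if missingSum < n ∨ missingSum > 6 * n then []
  else
    let extra := missingSum - n
    let sixes := PySem.Int.floordiv extra 5
    let leftover := PySem.Int.mod extra 5
    let mid : List Int := if leftover ≠ 0 then [1 + leftover] else []
    List.replicate sixes.toNat 6 ++ mid ++ List.replicate (n - sixes - (mid.length : Int)).toNat 1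

-- ===== PRECONDITION & SPEC =====
def Spec_missingRolls (rolls : List Int) (mean : Int) (n : Int) (out : List Int) : Prop := out = missingRolls_alt rolls mean n
instance (rolls : List Int) (mean : Int) (n : Int) (out : List Int) : Decidable (Spec_missingRolls rolls mean n out) := by unfold Spec_missingRolls; infer_instance

-- ===== CLAIM (what is proved, stated in full; the proofs are below) =====
def Claim_equal_missingRolls : Prop := ∀ (rolls : List Int) (mean : Int) (n : Int), Dom_missingRolls rolls mean n → Spec_missingRolls rolls mean n (missingRolls rolls mean n)

-- ===== LEMMAS AND PROOFS =====

/-- A's loop as a structural recursion on the number of remaining dice. -/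
def pvGreedy : Nat → Int → List Int
  | 0, _ => []
  | k + 1, S =>
      let v := min 6 (S - (k + 1) + 1)
      v :: pvGreedy k (S - v)

theorem pvFold_eq (k : Nat) (S : Int) (acc : List Int) :
    ((PySem.List.pyRange (k : Int) 0 (-1)).foldl
      (fun (st : List Int × Int) x =>
        (st.1 ++ [min 6 (st.2 - x + 1)], st.2 - min 6 (st.2 - x + 1))) (acc, S)).1
      = acc ++ pvGreedy k S := by
  induction k generalizing S acc with
  | zero => simp [PySem.List.pyRange_neg_one_eq_nil (by norm_num : (0:Int) ≤ 0), pvGreedy]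
  | succ k ih =>
      rw [PySem.List.pyRange_neg_one_cons (by exact_mod_cast Nat.succ_pos k)]
      have h1 : ((k + 1 : Nat) : Int) - 1 = (k : Int) := by push_cast; ring
      simp only [List.foldl_cons, h1]
      rw [ih]
      simp [pvGreedy]

theorem pvGreedy_ones (k : Nat) : pvGreedy k (k : Int) = List.replicate k 1 := by
  induction k with
  | zero => simp [pvGreedy]
  | succ k ih =>
      have hv : min (6 : Int) ((k + 1 : Nat) - (k + 1) + 1) = 1 := by push_cast; omega
      have h2 : ((k + 1 : Nat) : Int) - 1 = (k : Int) := by push_cast; ring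
      simp only [pvGreedy, hv, h2, ih, List.replicate_succ]

theorem pvGreedy_closed (k : Nat) (S : Int) (hlo : (k : Int) ≤ S) (hhi : S ≤ 6 * k) :
    pvGreedy k S =
      List.replicate ((S - k) / 5).toNat 6 ++
      (if (S - k) % 5 ≠ 0 then [1 + (S - k) % 5] else []) ++
      List.replicate ((k : Int) - ((S - k) / 5) - (if (S - k) % 5 ≠ 0 then 1 else 0)).toNat 1 := by
  induction k generalizing S with
  | zero =>
      have hS : S = 0 := by push_cast at hlo hhi; omega
      subst hS; simp [pvGreedy]
  | succ k ih =>
      have e5 : (S - (k + 1 : Nat)) / 5 * 5 + (S - (k + 1 : Nat)) % 5 = S - (k + 1 : Nat) :=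
        Int.ediv_mul_add_emod _ 5
      have emod_lo : 0 ≤ (S - (k + 1 : Nat)) % 5 := Int.emod_nonneg _ (by norm_num)
      have emod_hi : (S - (k + 1 : Nat)) % 5 < 5 := Int.emod_lt_of_pos _ (by norm_num)
      by_cases hbig : (k : Int) + 6 ≤ S
      · -- the first die is a 6
        have hv : min (6 : Int) (S - ((k : Int) + 1) + 1) = 6 := by omega
        have e5' : (S - 6 - (k : Nat)) / 5 * 5 + (S - 6 - (k : Nat)) % 5 = S - 6 - (k : Nat) :=
          Int.ediv_mul_add_emod _ 5
        have emod_lo' : 0 ≤ (S - 6 - (k : Nat)) % 5 := Int.emod_nonneg _ (by norm_num)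
        have emod_hi' : (S - 6 - (k : Nat)) % 5 < 5 := Int.emod_lt_of_pos _ (by norm_num)
        have hq : (S - (k + 1 : Nat)) / 5 = (S - 6 - (k : Nat)) / 5 + 1 := by
          push_cast at e5 e5' ⊢; omega
        have hr : (S - (k + 1 : Nat)) % 5 = (S - 6 - (k : Nat)) % 5 := by
          push_cast at e5 e5' hq ⊢; omega
        have hq0 : 0 ≤ (S - 6 - (k : Nat)) / 5 := by push_cast at e5'; push_cast at hbig; omega
        have htN : ((S - 6 - (k : Nat)) / 5 + 1).toNat = ((S - 6 - (k : Nat)) / 5).toNat + 1 := by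
          omega
        have hcnt : (((k + 1 : Nat) : Int) - ((S - 6 - (k : Nat)) / 5 + 1) -
              (if (S - 6 - (k : Nat)) % 5 ≠ 0 then (1 : Int) else 0))
            = ((k : Nat) : Int) - ((S - 6 - (k : Nat)) / 5) -
              (if (S - 6 - (k : Nat)) % 5 ≠ 0 then (1 : Int) else 0) := by
          push_cast; ring
        simp only [pvGreedy]
        rw [hv, ih (S - 6) (by push_cast at hlo ⊢; omega) (by push_cast at hhi ⊢; omega),
            hq, hr, hcnt, htN, List.replicate_succ]
        simp only [List.cons_append, List.append_assoc]
      · -- the first die is the partial one (possibly a 1)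
        have hv : min (6 : Int) (S - ((k : Int) + 1) + 1) = S - k := by
          push_cast at hlo; omega
        have hrest : S - (S - (k : Int)) = (k : Int) := by ring
        have hq : (S - (k + 1 : Nat)) / 5 = 0 := by push_cast at e5 ⊢; omega
        have hr : (S - (k + 1 : Nat)) % 5 = S - k - 1 := by push_cast at e5 hq ⊢; omega
        simp only [pvGreedy]
        rw [hv, hrest, pvGreedy_ones, hq, hr]
        by_cases h0 : S - (k : Int) - 1 = 0
        · have hS1 : S - (k : Int) = 1 := by omega
          have hcnt : (((k + 1 : Nat) : Int) - 0 - 0).toNat = k + 1 := by push_cast; omega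
          rw [if_neg (by omega), if_neg (by omega), hS1, hcnt, List.replicate_succ]
          simp
        · have hone : 1 + (S - (k : Int) - 1) = S - k := by ring
          have hcnt : (((k + 1 : Nat) : Int) - 0 - 1).toNat = k := by push_cast; omega
          rw [if_pos h0, if_pos h0, hone, hcnt]
          simp

-- ===== VERDICT (by name: the statement is the Claim_ definition above) =====
theorem missingRolls_spec : Claim_equal_missingRolls := by
  intro rolls mean n _
  unfold Spec_missingRolls
  simp only [missingRolls, missingRolls_alt]
  by_cases hg : ((rolls.length : Int) + n) * mean - rolls.sum < n ∨
      ((rolls.length : Int) + n) * mean - rolls.sum > 6 * n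
  · rw [if_pos hg, if_pos hg]
  · rw [if_neg hg, if_neg hg]
    rw [not_or, not_lt, not_lt] at hg
    obtain ⟨h1, h2⟩ := hg
    have hn0 : 0 ≤ n := by omega
    obtain ⟨k, rfl⟩ := Int.eq_ofNat_of_zero_le hn0
    rw [pvFold_eq, pvGreedy_closed k _ h1 h2]
    rw [PySem.Int.floordiv_eq_ediv_of_pos (by norm_num),
        PySem.Int.mod_eq_emod_of_pos (by norm_num)]
    by_cases hr : (((rolls.length : Int) + k) * mean - rolls.sum - (k : Int)) % 5 = 0
    · simp [hr]
    · simp [hr]
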